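-- pv_equiv track=rewrite | github.com/kkemppi/TIE-courses | Ohjelmointi 1/Ohjelmointi 1/alle 7. krs/tekstin_tasaus.py | min_width_with_spaces
-- ===== SOURCE A (Python) =====
-- def min_width_with_spaces(list_of_words):
--     # With spaces after every word, except last
--     i = 0
--     for index_of_word in range(len(list_of_words)):
--         i += len(list_of_words[index_of_word])
--         if index_of_word == len(list_of_words) - 1:
--             return i
--         i += 1
--     return i
-- ===== SOURCE B (Python) =====
-- def min_width_with_spaces(list_of_words):
--     # Build the actual single-spaced line and measure it
--     return len(" ".join(list_of_words))
-- ===== Notes on version B (the rewrite author's own statement) =====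
-- stated objective: idiomatic
-- what changed: Instead of summing lengths in an index loop with an early-return separator branch, B constructs the actual single-spaced line with ' '.join and returns its length; no per-word arithmetic or accumulator at all.
import Mathlib
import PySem

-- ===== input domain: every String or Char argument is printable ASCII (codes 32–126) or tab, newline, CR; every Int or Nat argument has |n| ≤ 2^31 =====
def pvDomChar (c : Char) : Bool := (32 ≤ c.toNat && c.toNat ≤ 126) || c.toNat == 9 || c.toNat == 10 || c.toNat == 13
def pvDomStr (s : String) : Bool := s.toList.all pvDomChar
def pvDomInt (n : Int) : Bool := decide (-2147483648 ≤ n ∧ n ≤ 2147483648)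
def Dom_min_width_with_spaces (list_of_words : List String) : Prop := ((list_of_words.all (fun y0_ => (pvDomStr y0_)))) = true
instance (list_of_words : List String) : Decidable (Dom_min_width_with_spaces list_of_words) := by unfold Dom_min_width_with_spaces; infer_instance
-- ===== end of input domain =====

-- B builds the single-spaced line with " ".join and returns its length instead of A's
-- index loop with accumulator and early-return separator branch; objective: idiomatic.


-- ===== PORT A =====
-- Loop over indices with accumulator i; when the index is the last one, return early
-- (equivalently: when exactly one word remains), otherwise add the separator and continue.
def min_width_with_spaces_go : List String → Int → Int
  | [], i => i
  | [w], i => i + (PySem.Str.len w)                 -- index_of_word == len-1: return i after adding the word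
  | w :: ws, i => min_width_with_spaces_go ws (i + (PySem.Str.len w) + 1)

def min_width_with_spaces (list_of_words : List String) : Int :=
  min_width_with_spaces_go list_of_words 0

-- ===== PORT B =====
def min_width_with_spaces_alt (list_of_words : List String) : Int :=
  PySem.Str.len (PySem.Str.join " " list_of_words)

-- ===== PRECONDITION & SPEC =====
def Spec_min_width_with_spaces (list_of_words : List String) (out : Int) : Prop := out = min_width_with_spaces_alt list_of_words
instance (list_of_words : List String) (out : Int) : Decidable (Spec_min_width_with_spaces list_of_words out) := by unfold Spec_min_width_with_spaces; infer_instance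

-- ===== CLAIM =====
def Claim_equal_min_width_with_spaces : Prop := ∀ (list_of_words : List String), Dom_min_width_with_spaces list_of_words → Spec_min_width_with_spaces list_of_words (min_width_with_spaces list_of_words)

-- ===== LEMMAS AND PROOFS =====

-- A's loop on a nonempty list returns the running total plus the length of the joined line.
theorem min_width_with_spaces_go_eq (xs : List String) (hne : xs ≠ []) (i : Int) :
    min_width_with_spaces_go xs i
      = i + ((PySem.Chars.join [' '] (xs.map String.toList)).length : Int) := by
  induction xs generalizing i with
  | nil => exact absurd rfl hne
  | cons w ws ih =>
    cases ws with
    | nil => simp [min_width_with_spaces_go, PySem.Chars.join_singleton]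
    | cons v vs =>
      have hstep : min_width_with_spaces_go (w :: v :: vs) i
          = min_width_with_spaces_go (v :: vs) (i + (PySem.Str.len w) + 1) := rfl
      rw [hstep, ih (List.cons_ne_nil _ _)]
      simp only [List.map_cons]
      rw [PySem.Chars.join_cons_cons]
      simp
      push_cast
      ring

-- ===== VERDICT =====
theorem min_width_with_spaces_spec : Claim_equal_min_width_with_spaces := by
  intro xs _
  unfold Spec_min_width_with_spaces min_width_with_spaces min_width_with_spaces_alt
  cases xs with
  | nil => simp [min_width_with_spaces_go, PySem.Str.toList_join, PySem.Chars.join_nil]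
  | cons w ws =>
    rw [min_width_with_spaces_go_eq _ (by simp)]
    simp [PySem.Str.toList_join]
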